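-- pv_equiv track=rewrite | github.com/yashitanamdeo/geeks-for-geeks | hard/adventure_in_a_maze/solution.py | FindWays
-- ===== SOURCE A (Python) =====
-- from itertools import product
--
-- MOD = int(1e9 + 7)
--
-- def FindWays(matrix):
--     m, n = len(matrix), len(matrix[0])
--     dp = [[(0, 0) for _ in range(n)] for __ in range(m)]
--     dp[0][0] = (1, matrix[0][0])
--
--     for i in range(1, m):
--         if matrix[i - 1][0] == 1:
--             break
--         val = dp[i - 1][0][1]
--         dp[i][0] = (1, val + matrix[i][0])
--
--     for j in range(1, n):
--         if matrix[0][j - 1] == 2: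
--             break
--         val = dp[0][j - 1][1]
--         dp[0][j] = (1, val + matrix[0][j])
--
--     for i, j in product(range(1, m), range(1, n)):
--         cnt_top, val_top = dp[i - 1][j]
--         cnt_left, val_left = dp[i][j - 1]
--         cnt, val = 0, 0
--
--         if matrix[i - 1][j] != 1 and cnt_top:
--             cnt = cnt_top % MOD
--             val = val_top + matrix[i][j]
--
--         if matrix[i][j - 1] != 2 and cnt_left:
--             cnt = (cnt + cnt_left) % MOD
--             val = max(val, val_left + matrix[i][j])
--
--         dp[i][j] = (cnt, val)
--
--     return list(dp[m - 1][n - 1])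
-- ===== SOURCE B (Python) =====
-- MOD = int(1e9 + 7)
--
-- def FindWays(matrix):
--     # top-down memoized recursion over cell coordinates instead of A's 2D table with three loops
--     m, n = len(matrix), len(matrix[0])
--     memo = {}
--
--     def solve(i, j):
--         if (i, j) in memo:
--             return memo[(i, j)]
--         if i == 0 and j == 0:
--             res = (1, matrix[0][0])
--         elif j == 0:
--             if matrix[i - 1][0] == 1:
--                 res = (0, 0)
--             else:
--                 c, v = solve(i - 1, 0)
--                 res = (0, 0) if c == 0 else (1, v + matrix[i][0])
--         elif i == 0:
--             if matrix[0][j - 1] == 2: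
--                 res = (0, 0)
--             else:
--                 c, v = solve(0, j - 1)
--                 res = (0, 0) if c == 0 else (1, v + matrix[0][j])
--         else:
--             ct, vt = solve(i - 1, j)
--             cl, vl = solve(i, j - 1)
--             if matrix[i - 1][j] != 1 and ct != 0:
--                 c1, v1 = ct % MOD, vt + matrix[i][j]
--             else:
--                 c1, v1 = 0, 0
--             if matrix[i][j - 1] != 2 and cl != 0:
--                 res = ((c1 + cl) % MOD, max(v1, vl + matrix[i][j]))
--             else:
--                 res = (c1, v1)
--         memo[(i, j)] = res
--         return res
--
--     c, v = solve(m - 1, n - 1)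
--     return [c, v]
-- ===== Notes on version B (the rewrite author's own statement) =====
-- stated objective: alternative
-- what changed: B replaces A's bottom-up 2D dp table (two edge loops with break plus an itertools.product double loop) by a top-down memoized recursion solve(i,j) over cell coordinates that returns the (count, maxval) pair of each cell on demand.
-- outside the precondition, e.g. on FindWays([[1], []]): A returns [0, 0], B returns [0, 0]; on FindWays([[1], [], [0]]): A returns [0, 0], B raises IndexError
import Mathlib
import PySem

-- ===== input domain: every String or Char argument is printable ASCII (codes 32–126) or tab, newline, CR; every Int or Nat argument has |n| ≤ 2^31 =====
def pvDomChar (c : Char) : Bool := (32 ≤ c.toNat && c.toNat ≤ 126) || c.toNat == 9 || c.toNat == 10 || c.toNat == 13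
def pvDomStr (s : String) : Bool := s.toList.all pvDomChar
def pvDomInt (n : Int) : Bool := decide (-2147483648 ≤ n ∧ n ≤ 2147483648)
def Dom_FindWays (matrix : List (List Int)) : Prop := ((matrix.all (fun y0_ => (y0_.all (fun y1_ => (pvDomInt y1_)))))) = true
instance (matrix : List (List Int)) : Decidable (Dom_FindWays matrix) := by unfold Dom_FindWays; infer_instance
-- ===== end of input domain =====

-- B replaces A's 2D dp table (two edge loops with break + a product loop) by a top-down
-- recursion on the cell coordinates (memoized with a dict in Source B; the cache only stores the
-- pure results of solve, so the port below is the same recursion written without the cache).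

-- ===== PORT A =====
def pvMOD : Int := 1000000007

-- matrix[i][j] for the Nat indices the loops produce; under Pre_ every access is in range,
-- so getD is exact (Python raises only outside Pre_).
def pvG (matrix : List (List Int)) (i j : Nat) : Int := (matrix.getD i []).getD j 0

def pvGet2 (dp : List (List (Int × Int))) (i j : Nat) : Int × Int := (dp.getD i []).getD j (0, 0)

def pvSet2 (dp : List (List (Int × Int))) (i j : Nat) (v : Int × Int) : List (List (Int × Int)) :=
  dp.set i ((dp.getD i []).set j v)

-- `for i in range(1, m): if matrix[i-1][0] == 1: break; dp[i][0] = (1, dp[i-1][0][1] + matrix[i][0])`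
def pvColLoop (matrix : List (List Int)) (m : Nat) (dp : List (List (Int × Int))) (i : Nat) :
    List (List (Int × Int)) :=
  if i < m then
    if pvG matrix (i - 1) 0 == 1 then dp
    else pvColLoop matrix m (pvSet2 dp i 0 (1, (pvGet2 dp (i - 1) 0).2 + pvG matrix i 0)) (i + 1)
  else dp
termination_by m - i

-- `for j in range(1, n): if matrix[0][j-1] == 2: break; dp[0][j] = (1, dp[0][j-1][1] + matrix[0][j])`
def pvRowLoop (matrix : List (List Int)) (n : Nat) (dp : List (List (Int × Int))) (j : Nat) :
    List (List (Int × Int)) :=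
  if j < n then
    if pvG matrix 0 (j - 1) == 2 then dp
    else pvRowLoop matrix n (pvSet2 dp 0 j (1, (pvGet2 dp 0 (j - 1)).2 + pvG matrix 0 j)) (j + 1)
  else dp
termination_by n - j

-- the body of the `for i, j in product(range(1, m), range(1, n))` loop
def pvCell (matrix : List (List Int)) (dp : List (List (Int × Int))) (i j : Nat) :
    List (List (Int × Int)) :=
  let ct := (pvGet2 dp (i - 1) j).1
  let vt := (pvGet2 dp (i - 1) j).2
  let cl := (pvGet2 dp i (j - 1)).1
  let vl := (pvGet2 dp i (j - 1)).2
  let p1 : Int × Int :=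
    if pvG matrix (i - 1) j ≠ 1 ∧ ct ≠ 0 then (PySem.Int.mod ct pvMOD, vt + pvG matrix i j)
    else (0, 0)
  let p2 : Int × Int :=
    if pvG matrix i (j - 1) ≠ 2 ∧ cl ≠ 0 then (PySem.Int.mod (p1.1 + cl) pvMOD, max p1.2 (vl + pvG matrix i j))
    else p1
  pvSet2 dp i j p2

def FindWays (matrix : List (List Int)) : List Int :=
  let m := matrix.length
  let n := (matrix.getD 0 []).length
  let dp0 := List.replicate m (List.replicate n ((0 : Int), (0 : Int)))
  let dp1 := pvSet2 dp0 0 0 (1, pvG matrix 0 0)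
  let dp2 := pvColLoop matrix m dp1 1
  let dp3 := pvRowLoop matrix n dp2 1
  let dp4 :=
    ((List.range' 1 (m - 1)).flatMap fun i => (List.range' 1 (n - 1)).map fun j => (i, j)).foldl
      (fun dp ij => pvCell matrix dp ij.1 ij.2) dp3
  [(pvGet2 dp4 (m - 1) (n - 1)).1, (pvGet2 dp4 (m - 1) (n - 1)).2]

-- ===== PORT B =====
-- Source B's solve(i, j): the dict memo caches solve's pure results, so it is omitted here.
def pvSolve (matrix : List (List Int)) : Nat → Nat → Int × Int
  | 0, 0 => (1, pvG matrix 0 0)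
  | i + 1, 0 =>
      if pvG matrix i 0 == 1 then (0, 0)
      else
        let p := pvSolve matrix i 0
        if p.1 == 0 then (0, 0) else (1, p.2 + pvG matrix (i + 1) 0)
  | 0, j + 1 =>
      if pvG matrix 0 j == 2 then (0, 0)
      else
        let p := pvSolve matrix 0 j
        if p.1 == 0 then (0, 0) else (1, p.2 + pvG matrix 0 (j + 1))
  | i + 1, j + 1 =>
      let t := pvSolve matrix i (j + 1)
      let l := pvSolve matrix (i + 1) j
      let p1 : Int × Int :=
        if pvG matrix i (j + 1) ≠ 1 ∧ t.1 ≠ 0 then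
          (PySem.Int.mod t.1 pvMOD, t.2 + pvG matrix (i + 1) (j + 1))
        else (0, 0)
      if pvG matrix (i + 1) j ≠ 2 ∧ l.1 ≠ 0 then
        (PySem.Int.mod (p1.1 + l.1) pvMOD, max p1.2 (l.2 + pvG matrix (i + 1) (j + 1)))
      else p1
termination_by i j => i + j

def FindWays_alt (matrix : List (List Int)) : List Int :=
  let p := pvSolve matrix (matrix.length - 1) ((matrix.getD 0 []).length - 1)
  [p.1, p.2]

-- ===== PRECONDITION & SPEC =====
-- Pre_ excludes the matrices on which A's fixed index pattern may raise IndexError: an empty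
-- matrix, an empty first row, or a row shorter than the first row (on a few such ragged inputs
-- an early `break` happens to skip the short row and A still returns; Pre_ excludes those too).
def Pre_FindWays (matrix : List (List Int)) : Prop :=
  matrix ≠ [] ∧ (matrix.getD 0 []) ≠ [] ∧
    ∀ row ∈ matrix, (matrix.getD 0 []).length ≤ row.length
instance (matrix : List (List Int)) : Decidable (Pre_FindWays matrix) := by
  unfold Pre_FindWays; infer_instance

def pvWitness_FindWays : List (List Int) := [[0, 2, 0], [3, 0, 5], [0, 0, 0]]

def Spec_FindWays (matrix : List (List Int)) (out : List Int) : Prop := out = FindWays_alt matrix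
instance (matrix : List (List Int)) (out : List Int) : Decidable (Spec_FindWays matrix out) := by
  unfold Spec_FindWays; infer_instance

-- ===== CLAIM (what is proved, stated in full; the proofs are below) =====
def Claim_equal_FindWays : Prop :=
  ∀ (matrix : List (List Int)), Dom_FindWays matrix → Pre_FindWays matrix →
    Spec_FindWays matrix (FindWays matrix)

-- ===== LEMMAS AND PROOFS =====

theorem pvGetD_set_self {α : Type} (l : List α) (i : Nat) (a d : α) (h : i < l.length) :
    (l.set i a).getD i d = a := by
  simp [List.getD_eq_getElem?_getD, List.getElem?_set_self h]

theorem pvGetD_set_ne {α : Type} {l : List α} {i j : Nat} (h : i ≠ j) (a d : α) :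
    (l.set i a).getD j d = l.getD j d := by
  simp [List.getD_eq_getElem?_getD, List.getElem?_set_ne h]

-- table shape: m rows, each of length n
def pvShape (dp : List (List (Int × Int))) (m n : Nat) : Prop :=
  dp.length = m ∧ ∀ i, i < m → (dp.getD i []).length = n

theorem pvShape_replicate (m n : Nat) :
    pvShape (List.replicate m (List.replicate n ((0 : Int), (0 : Int)))) m n := by
  refine ⟨by simp, ?_⟩
  intro i hi
  simp [List.getD_eq_getElem?_getD, hi]

theorem pvGet2_replicate (m n i j : Nat) :
    pvGet2 (List.replicate m (List.replicate n ((0 : Int), (0 : Int)))) i j = (0, 0) := by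
  unfold pvGet2
  by_cases hi : i < m <;>
    by_cases hj : j < n <;>
      simp [List.getD_eq_getElem?_getD, hi, hj]

theorem pvShape_set2 {dp : List (List (Int × Int))} {m n : Nat} (hs : pvShape dp m n)
    (i j : Nat) (v : Int × Int) : pvShape (pvSet2 dp i j v) m n := by
  obtain ⟨hl, hr⟩ := hs
  refine ⟨by simp [pvSet2, hl], ?_⟩
  intro k hk
  unfold pvSet2
  by_cases hik : i = k
  · subst hik
    rw [pvGetD_set_self _ _ _ _ (by omega), List.length_set]
    exact hr i hk
  · rw [pvGetD_set_ne hik]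
    exact hr k hk

theorem pvGet2_set2_same {dp : List (List (Int × Int))} {m n : Nat} (hs : pvShape dp m n)
    {i j : Nat} (hi : i < m) (hj : j < n) (v : Int × Int) :
    pvGet2 (pvSet2 dp i j v) i j = v := by
  obtain ⟨hl, hr⟩ := hs
  unfold pvGet2 pvSet2
  rw [pvGetD_set_self _ _ _ _ (by omega), pvGetD_set_self _ _ _ _ (by rw [hr i hi]; exact hj)]

theorem pvGet2_set2_ne {dp : List (List (Int × Int))} {i j i' j' : Nat}
    (h : i ≠ i' ∨ j ≠ j') (v : Int × Int) :
    pvGet2 (pvSet2 dp i' j' v) i j = pvGet2 dp i j := by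
  unfold pvGet2 pvSet2
  by_cases hii : i' = i
  · subst hii
    have hjj : j' ≠ j := by tauto
    by_cases hlt : i' < dp.length
    · rw [pvGetD_set_self _ _ _ _ hlt, pvGetD_set_ne hjj]
    · rw [List.set_eq_of_length_le (by omega)]
  · rw [pvGetD_set_ne hii]

-- once the count in column 0 is zero it stays zero
theorem pvSolve_col_zero {matrix : List (List Int)} {k : Nat}
    (h : pvSolve matrix k 0 = (0, 0)) : ∀ i, k ≤ i → pvSolve matrix i 0 = (0, 0) := by
  intro i hi
  induction i, hi using Nat.le_induction with
  | base => exact h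
  | succ i hki ih => simp [pvSolve, ih]

theorem pvSolve_row_zero {matrix : List (List Int)} {k : Nat}
    (h : pvSolve matrix 0 k = (0, 0)) : ∀ j, k ≤ j → pvSolve matrix 0 j = (0, 0) := by
  intro j hj
  induction j, hj using Nat.le_induction with
  | base => exact h
  | succ j hkj ih => simp [pvSolve, ih]

-- the first edge loop of A computes column 0 of the recursion
theorem pvColLoop_spec (matrix : List (List Int)) {m n : Nat} (hn : 0 < n) :
    ∀ (d k : Nat) (dp : List (List (Int × Int))), m - k = d → 1 ≤ k →
      pvShape dp m n →
      (∀ i, i < k → pvGet2 dp i 0 = pvSolve matrix i 0) →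
      (∀ i, k ≤ i → i < m → pvGet2 dp i 0 = (0, 0)) →
      (pvSolve matrix (k - 1) 0).1 = 1 →
      pvShape (pvColLoop matrix m dp k) m n ∧
      (∀ i, i < m → pvGet2 (pvColLoop matrix m dp k) i 0 = pvSolve matrix i 0) ∧
      (∀ i j, j ≠ 0 → pvGet2 (pvColLoop matrix m dp k) i j = pvGet2 dp i j) := by
  intro d
  induction d with
  | zero =>
      intro k dp hd hk hs hprev _ _
      rw [pvColLoop, if_neg (by omega)]
      exact ⟨hs, fun i hi => hprev i (by omega), fun i j _ => rfl⟩
  | succ d ih =>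
      intro k dp hd hk hs hprev hdef hrun
      obtain ⟨k', rfl⟩ : ∃ k', k = k' + 1 := ⟨k - 1, by omega⟩
      have hkm : k' + 1 < m := by omega
      simp only [Nat.add_sub_cancel] at hrun
      rw [pvColLoop, if_pos hkm]
      by_cases hb : pvG matrix (k' + 1 - 1) 0 == 1
      · rw [if_pos hb]
        have hz : pvSolve matrix (k' + 1) 0 = (0, 0) := by
          simp only [Nat.add_sub_cancel] at hb
          simp [pvSolve, hb]
        refine ⟨hs, ?_, fun i j _ => rfl⟩
        intro i hi
        by_cases hik : i < k' + 1
        · exact hprev i hik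
        · rw [hdef i (by omega) hi, pvSolve_col_zero hz i (by omega)]
      · rw [if_neg hb]
        simp only [Nat.add_sub_cancel] at hb
        have hstep : pvSolve matrix (k' + 1) 0 =
            (1, (pvSolve matrix k' 0).2 + pvG matrix (k' + 1) 0) := by
          simp [pvSolve, hb, hrun]
        have hR : pvSolve matrix (k' + 1) 0 =
            (1, (pvGet2 dp (k' + 1 - 1) 0).2 + pvG matrix (k' + 1) 0) := by
          simp only [Nat.add_sub_cancel]
          rw [hprev k' (by omega)]
          exact hstep
        set dp' := pvSet2 dp (k' + 1) 0
          (1, (pvGet2 dp (k' + 1 - 1) 0).2 + pvG matrix (k' + 1) 0) with hdp'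
        have hprev' : ∀ i, i < k' + 2 → pvGet2 dp' i 0 = pvSolve matrix i 0 := by
          intro i hi
          by_cases hik : i = k' + 1
          · subst hik
            rw [hdp', pvGet2_set2_same hs hkm hn, hR]
          · rw [hdp', pvGet2_set2_ne (Or.inl hik)]
            exact hprev i (by omega)
        have hdef' : ∀ i, k' + 2 ≤ i → i < m → pvGet2 dp' i 0 = (0, 0) := by
          intro i hi him
          rw [hdp', pvGet2_set2_ne (Or.inl (by omega))]
          exact hdef i (by omega) him
        have hrun' : (pvSolve matrix (k' + 2 - 1) 0).1 = 1 := by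
          show (pvSolve matrix (k' + 1) 0).1 = 1
          rw [hstep]
        obtain ⟨s1, s2, s3⟩ := ih (k' + 2) dp' (by omega) (by omega)
          (pvShape_set2 hs _ _ _) hprev' hdef' hrun'
        refine ⟨s1, s2, ?_⟩
        intro i j hj
        rw [s3 i j hj, hdp', pvGet2_set2_ne (Or.inr hj)]

-- the second edge loop of A computes row 0 of the recursion
theorem pvRowLoop_spec (matrix : List (List Int)) {m n : Nat} (hm : 0 < m) :
    ∀ (d k : Nat) (dp : List (List (Int × Int))), n - k = d → 1 ≤ k →
      pvShape dp m n →
      (∀ j, j < k → pvGet2 dp 0 j = pvSolve matrix 0 j) →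
      (∀ j, k ≤ j → j < n → pvGet2 dp 0 j = (0, 0)) →
      (pvSolve matrix 0 (k - 1)).1 = 1 →
      pvShape (pvRowLoop matrix n dp k) m n ∧
      (∀ j, j < n → pvGet2 (pvRowLoop matrix n dp k) 0 j = pvSolve matrix 0 j) ∧
      (∀ i j, i ≠ 0 → pvGet2 (pvRowLoop matrix n dp k) i j = pvGet2 dp i j) := by
  intro d
  induction d with
  | zero =>
      intro k dp hd hk hs hprev _ _
      rw [pvRowLoop, if_neg (by omega)]
      exact ⟨hs, fun j hj => hprev j (by omega), fun i j _ => rfl⟩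
  | succ d ih =>
      intro k dp hd hk hs hprev hdef hrun
      obtain ⟨k', rfl⟩ : ∃ k', k = k' + 1 := ⟨k - 1, by omega⟩
      have hkn : k' + 1 < n := by omega
      simp only [Nat.add_sub_cancel] at hrun
      rw [pvRowLoop, if_pos hkn]
      by_cases hb : pvG matrix 0 (k' + 1 - 1) == 2
      · rw [if_pos hb]
        have hz : pvSolve matrix 0 (k' + 1) = (0, 0) := by
          simp only [Nat.add_sub_cancel] at hb
          simp [pvSolve, hb]
        refine ⟨hs, ?_, fun i j _ => rfl⟩
        intro j hj
        by_cases hjk : j < k' + 1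
        · exact hprev j hjk
        · rw [hdef j (by omega) hj, pvSolve_row_zero hz j (by omega)]
      · rw [if_neg hb]
        simp only [Nat.add_sub_cancel] at hb
        have hstep : pvSolve matrix 0 (k' + 1) =
            (1, (pvSolve matrix 0 k').2 + pvG matrix 0 (k' + 1)) := by
          simp [pvSolve, hb, hrun]
        have hR : pvSolve matrix 0 (k' + 1) =
            (1, (pvGet2 dp 0 (k' + 1 - 1)).2 + pvG matrix 0 (k' + 1)) := by
          simp only [Nat.add_sub_cancel]
          rw [hprev k' (by omega)]
          exact hstep
        set dp' := pvSet2 dp 0 (k' + 1)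
          (1, (pvGet2 dp 0 (k' + 1 - 1)).2 + pvG matrix 0 (k' + 1)) with hdp'
        have hprev' : ∀ j, j < k' + 2 → pvGet2 dp' 0 j = pvSolve matrix 0 j := by
          intro j hj
          by_cases hjk : j = k' + 1
          · subst hjk
            rw [hdp', pvGet2_set2_same hs hm hkn, hR]
          · rw [hdp', pvGet2_set2_ne (Or.inr hjk)]
            exact hprev j (by omega)
        have hdef' : ∀ j, k' + 2 ≤ j → j < n → pvGet2 dp' 0 j = (0, 0) := by
          intro j hj hjn
          rw [hdp', pvGet2_set2_ne (Or.inr (by omega))]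
          exact hdef j (by omega) hjn
        have hrun' : (pvSolve matrix 0 (k' + 2 - 1)).1 = 1 := by
          show (pvSolve matrix 0 (k' + 1)).1 = 1
          rw [hstep]
        obtain ⟨s1, s2, s3⟩ := ih (k' + 2) dp' (by omega) (by omega)
          (pvShape_set2 hs _ _ _) hprev' hdef' hrun'
        refine ⟨s1, s2, ?_⟩
        intro i j hi
        rw [s3 i j hi, hdp', pvGet2_set2_ne (Or.inl hi)]

-- one interior step of A's product loop computes the recursion at that cell
theorem pvCell_eq (matrix : List (List Int)) {m n : Nat} {dp : List (List (Int × Int))}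
    (hs : pvShape dp m n) {i j : Nat} (him : i + 1 < m) (hjn : j + 1 < n)
    (ht : pvGet2 dp i (j + 1) = pvSolve matrix i (j + 1))
    (hl : pvGet2 dp (i + 1) j = pvSolve matrix (i + 1) j) :
    pvShape (pvCell matrix dp (i + 1) (j + 1)) m n ∧
    pvGet2 (pvCell matrix dp (i + 1) (j + 1)) (i + 1) (j + 1) = pvSolve matrix (i + 1) (j + 1) ∧
    ∀ i' j', (i' ≠ i + 1 ∨ j' ≠ j + 1) →
      pvGet2 (pvCell matrix dp (i + 1) (j + 1)) i' j' = pvGet2 dp i' j' := by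
  have hcell : pvCell matrix dp (i + 1) (j + 1) =
      pvSet2 dp (i + 1) (j + 1) (pvSolve matrix (i + 1) (j + 1)) := by
    unfold pvCell
    simp only [Nat.add_sub_cancel, ht, hl]
    congr 1
    simp only [pvSolve]
  refine ⟨?_, ?_, ?_⟩
  · rw [hcell]; exact pvShape_set2 hs _ _ _
  · rw [hcell, pvGet2_set2_same hs him hjn]
  · intro i' j' hne
    rw [hcell, pvGet2_set2_ne hne]

-- the inner loop over j completes row i of the table
theorem pvRowFold (matrix : List (List Int)) {m n : Nat} (i : Nat) (hi1 : 1 ≤ i) (him : i < m) :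
    ∀ (d jstart : Nat), jstart + d = n → 1 ≤ jstart →
      ∀ dp, pvShape dp m n →
        (∀ j, j < n → pvGet2 dp (i - 1) j = pvSolve matrix (i - 1) j) →
        (∀ j, j < jstart → pvGet2 dp i j = pvSolve matrix i j) →
        pvShape (List.foldl (fun dp j => pvCell matrix dp i j) dp (List.range' jstart d)) m n ∧
        (∀ j, j < n →
          pvGet2 (List.foldl (fun dp j => pvCell matrix dp i j) dp (List.range' jstart d)) i j =
            pvSolve matrix i j) ∧
        (∀ i' j', i' ≠ i →
          pvGet2 (List.foldl (fun dp j => pvCell matrix dp i j) dp (List.range' jstart d)) i' j' =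
            pvGet2 dp i' j') := by
  intro d
  induction d with
  | zero =>
      intro jstart hjs _ dp hs _ hcur
      exact ⟨hs, fun j hj => hcur j (by omega), fun i' j' _ => rfl⟩
  | succ d ih =>
      intro jstart hjs hjs1 dp hs hprevrow hcur
      obtain ⟨i0, rfl⟩ : ∃ i0, i = i0 + 1 := ⟨i - 1, by omega⟩
      obtain ⟨j0, rfl⟩ : ∃ j0, jstart = j0 + 1 := ⟨jstart - 1, by omega⟩
      rw [List.range'_succ, List.foldl_cons]
      have ht : pvGet2 dp i0 (j0 + 1) = pvSolve matrix i0 (j0 + 1) := hprevrow (j0 + 1) (by omega)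
      have hl : pvGet2 dp (i0 + 1) j0 = pvSolve matrix (i0 + 1) j0 := hcur j0 (by omega)
      obtain ⟨s1, s2, s3⟩ := pvCell_eq matrix hs him (by omega) ht hl
      have hprevrow' : ∀ j, j < n →
          pvGet2 (pvCell matrix dp (i0 + 1) (j0 + 1)) (i0 + 1 - 1) j =
            pvSolve matrix (i0 + 1 - 1) j := by
        intro j hj
        rw [show i0 + 1 - 1 = i0 from rfl, s3 i0 j (Or.inl (by omega))]
        exact hprevrow j hj
      have hcur' : ∀ j, j < j0 + 2 →
          pvGet2 (pvCell matrix dp (i0 + 1) (j0 + 1)) (i0 + 1) j = pvSolve matrix (i0 + 1) j := by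
        intro j hj
        by_cases hjq : j = j0 + 1
        · subst hjq; exact s2
        · rw [s3 (i0 + 1) j (Or.inr hjq)]
          exact hcur j (by omega)
      obtain ⟨t1, t2, t3⟩ := ih (j0 + 2) (by omega) (by omega) _ s1 hprevrow' hcur'
      refine ⟨t1, t2, ?_⟩
      intro i' j' hi'
      rw [t3 i' j' hi', s3 i' j' (Or.inl hi')]

-- the whole product loop completes every row of the table
theorem pvOuterFold (matrix : List (List Int)) {m n : Nat} (hn : 0 < n) :
    ∀ (d istart : Nat), istart + d = m → 1 ≤ istart →
      ∀ dp, pvShape dp m n →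
        (∀ i', i' < istart → ∀ j, j < n → pvGet2 dp i' j = pvSolve matrix i' j) →
        (∀ i', i' < m → pvGet2 dp i' 0 = pvSolve matrix i' 0) →
        ∀ i', i' < m → ∀ j, j < n →
          pvGet2 (List.foldl
              (fun dp i => List.foldl (fun dp j => pvCell matrix dp i j) dp (List.range' 1 (n - 1)))
              dp (List.range' istart d)) i' j = pvSolve matrix i' j := by
  intro d
  induction d with
  | zero =>
      intro istart his _ dp _ hrows _ i' hi' j hj
      exact hrows i' (by omega) j hj
  | succ d ih =>
      intro istart his his1 dp hs hrows hcol i' hi' j hj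
      rw [List.range'_succ, List.foldl_cons]
      obtain ⟨s1, s2, s3⟩ := pvRowFold matrix istart his1 (by omega) (n - 1) 1 (by omega)
        (by omega) dp hs (fun j hj => hrows (istart - 1) (by omega) j hj)
        (fun j hj => by
          have : j = 0 := by omega
          subst this
          exact hcol istart (by omega))
      refine ih (istart + 1) (by omega) (by omega) _ s1 ?_ ?_ i' hi' j hj
      · intro i'' hi'' j' hj'
        by_cases hq : i'' = istart
        · subst hq; exact s2 j' hj'
        · rw [s3 i'' j' hq]
          exact hrows i'' (by omega) j' hj'
      · intro i'' hi''
        by_cases hq : i'' = istart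
        · subst hq; exact s2 0 hn
        · rw [s3 i'' 0 hq]
          exact hcol i'' hi''

theorem pvMain (matrix : List (List Int)) (hm : 0 < matrix.length)
    (hn : 0 < (matrix.getD 0 []).length) : FindWays matrix = FindWays_alt matrix := by
  unfold FindWays FindWays_alt
  simp only [List.foldl_flatMap, List.foldl_map]
  set m := matrix.length with hmdef
  set n := (matrix.getD 0 []).length with hndef
  set dp0 := List.replicate m (List.replicate n ((0 : Int), (0 : Int))) with h0
  set dp1 := pvSet2 dp0 0 0 (1, pvG matrix 0 0) with h1
  have hs0 : pvShape dp0 m n := pvShape_replicate m n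
  have hs1 : pvShape dp1 m n := pvShape_set2 hs0 _ _ _
  have h00 : pvGet2 dp1 0 0 = pvSolve matrix 0 0 := by
    rw [h1, pvGet2_set2_same hs0 hm hn]
    simp [pvSolve]
  have hrun0 : (pvSolve matrix (1 - 1) 0).1 = 1 := by simp [pvSolve]
  obtain ⟨hs2, hcol2, hunch2⟩ := pvColLoop_spec matrix hn (m - 1) 1 dp1 rfl le_rfl hs1
    (fun i hi => by
      have : i = 0 := by omega
      subst this; exact h00)
    (fun i hi him => by
      rw [h1, pvGet2_set2_ne (Or.inl (by omega)), h0, pvGet2_replicate])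
    hrun0
  set dp2 := pvColLoop matrix m dp1 1 with h2
  have hrun0' : (pvSolve matrix 0 (1 - 1)).1 = 1 := by simp [pvSolve]
  obtain ⟨hs3, hrow3, hunch3⟩ := pvRowLoop_spec matrix hm (n - 1) 1 dp2 rfl le_rfl hs2
    (fun j hj => by
      have : j = 0 := by omega
      subst this; exact hcol2 0 hm)
    (fun j hj hjn => by
      rw [hunch2 0 j (by omega), h1, pvGet2_set2_ne (Or.inr (by omega)), h0, pvGet2_replicate])
    hrun0'
  set dp3 := pvRowLoop matrix n dp2 1 with h3
  have hcol3 : ∀ i', i' < m → pvGet2 dp3 i' 0 = pvSolve matrix i' 0 := by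
    intro i' hi'
    by_cases hq : i' = 0
    · subst hq; exact hrow3 0 hn
    · rw [hunch3 i' 0 hq]
      exact hcol2 i' hi'
  have hrows3 : ∀ i', i' < 1 → ∀ j, j < n → pvGet2 dp3 i' j = pvSolve matrix i' j := by
    intro i' hi' j hj
    have : i' = 0 := by omega
    subst this
    exact hrow3 j hj
  have key := pvOuterFold matrix hn (m - 1) 1 (by omega) le_rfl dp3 hs3 hrows3 hcol3
    (m - 1) (by omega) (n - 1) (by omega)
  rw [key]

-- ===== VERDICT (by name: the statement is the Claim_ definition above) =====
theorem FindWays_spec : Claim_equal_FindWays := by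
  intro matrix _ hpre
  obtain ⟨h1, h2, -⟩ := hpre
  unfold Spec_FindWays
  exact pvMain matrix (List.length_pos_of_ne_nil h1) (List.length_pos_of_ne_nil h2)
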